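-- pv_equiv track=rewrite | github.com/fatmakahveci/milestone | workflow/scripts/create_reference.py | get_nonintersecting_intervals
-- ===== SOURCE A (Python) =====
-- def get_nonintersecting_intervals( interval_list : list, cds_len: int ) -> list:
-- 	"""
-- 	Take the length of CDS and aligned regions
-- 	Extract the unaligned regions
--
-- 	Parameter
-- 	---------
-- 	interval_list : List of aligned regions
-- 	cds_len : Length of CDS to define range
--
-- 	Return
-- 	------
-- 	nonintersecting_interval_list : List of unaligned regions
-- 	"""
--
-- 	nonintersecting_interval_list = list()
-- 	for i, interval in enumerate(interval_list):
--
-- 		if i == 0 and interval[0] != 0: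
-- 			nonintersecting_interval_list.append( [0, interval[0] - 1] )
--
-- 		if i < len(interval_list) - 1:
-- 			nonintersecting_interval_list.append( [interval[1] + 1, interval_list[i+1][0] - 1] )
--
-- 		if i == len(interval_list) - 1 and interval[1] < cds_len:
-- 			nonintersecting_interval_list.append( [ interval[1] + 1, cds_len] )
--
-- 	return nonintersecting_interval_list
-- ===== SOURCE B (Python) =====
-- def get_nonintersecting_intervals(interval_list: list, cds_len: int) -> list:
--     if not interval_list:
--         return []
--     # Boundary-column view: gaps sit between an end-column and a start-column,
--     # padded with virtual boundaries -1 (before position 0) and cds_len+1 (after the CDS).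
--     lefts = [-1] + [iv[1] for iv in interval_list]
--     rights = [iv[0] for iv in interval_list] + [cds_len + 1]
--     cand = [[l + 1, r - 1] for l, r in zip(lefts, rights)]
--     out = cand[1:-1]
--     if rights[0] != 0:
--         out.insert(0, cand[0])
--     if cand[-1][0] <= cand[-1][1]:
--         out.append(cand[-1])
--     return out
-- ===== Notes on version B (the rewrite author's own statement) =====
-- stated objective: alternative
-- what changed: B works on boundary columns instead of intervals: it extracts the end-column padded with a virtual -1 and the start-column padded with a virtual cds_len+1, zips them into one candidate-gap list, takes cand[1:-1] unconditionally, and only filters the two padded end candidates (head kept iff first start != 0, tail kept iff nonempty), replacing A's indexed loop with three positional conditionals.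
import Mathlib
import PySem

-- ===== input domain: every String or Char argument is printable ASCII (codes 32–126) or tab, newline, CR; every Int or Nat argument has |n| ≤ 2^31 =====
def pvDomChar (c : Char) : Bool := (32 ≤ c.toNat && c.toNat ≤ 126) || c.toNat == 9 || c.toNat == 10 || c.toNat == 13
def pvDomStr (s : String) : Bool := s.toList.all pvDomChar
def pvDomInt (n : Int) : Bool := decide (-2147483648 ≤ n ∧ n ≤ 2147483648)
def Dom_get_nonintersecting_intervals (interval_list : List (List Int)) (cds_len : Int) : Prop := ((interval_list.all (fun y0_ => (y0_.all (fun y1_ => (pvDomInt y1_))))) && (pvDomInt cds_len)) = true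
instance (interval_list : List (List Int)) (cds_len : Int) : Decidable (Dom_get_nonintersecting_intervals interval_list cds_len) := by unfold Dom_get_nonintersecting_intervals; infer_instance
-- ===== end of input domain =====

-- ===== PORT A =====
-- One honest line: B recasts the task on boundary columns — ends padded with a virtual -1,
-- starts padded with a virtual cds_len+1, zipped into candidate gaps, then sliced/filtered
-- at the two ends — instead of A's single indexed loop with three positional conditionals ("alternative").
-- Port of A: a fold over enumerate(interval_list) with the three index conditionals.
-- pyGetD is exact here because Pre_ guarantees every interval has length >= 2
-- (and the i+1 access is guarded by i < len - 1).
def get_nonintersecting_intervals (interval_list : List (List Int)) (cds_len : Int) : List (List Int) :=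
  (PySem.List.enumerate interval_list 0).foldl (fun acc p =>
    let i := p.1
    let interval := p.2
    let acc := if i = 0 ∧ PySem.List.pyGetD interval 0 0 ≠ 0 then
        acc ++ [[0, PySem.List.pyGetD interval 0 0 - 1]] else acc
    let acc := if i < (interval_list.length : Int) - 1 then
        acc ++ [[PySem.List.pyGetD interval 1 0 + 1,
                 PySem.List.pyGetD (PySem.List.pyGetD interval_list (i + 1) []) 0 0 - 1]] else acc
    if i = (interval_list.length : Int) - 1 ∧ PySem.List.pyGetD interval 1 0 < cds_len then
        acc ++ [[PySem.List.pyGetD interval 1 0 + 1, cds_len]] else acc) []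

-- ===== PORT B =====
-- Port of B (Source B): pad the end-column with -1 and the start-column with cds_len+1,
-- zip the two columns into candidate gaps, take cand[1:-1], then conditionally
-- insert cand[0] at position 0 and append cand[-1].
def get_nonintersecting_intervals_alt (interval_list : List (List Int)) (cds_len : Int) : List (List Int) :=
  match interval_list with
  | [] => []
  | first :: rest =>
    let l := first :: rest
    let lefts := (-1 : Int) :: l.map (fun iv => PySem.List.pyGetD iv 1 0)
    let rights := l.map (fun iv => PySem.List.pyGetD iv 0 0) ++ [cds_len + 1]
    let cand := (lefts.zip rights).map (fun p => [p.1 + 1, p.2 - 1])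
    let out := PySem.List.slice cand (some 1) (some (-1))
    let out := if PySem.List.pyGetD rights 0 0 ≠ 0 then
        PySem.List.insert out 0 (PySem.List.pyGetD cand 0 []) else out
    let lastc := PySem.List.pyGetD cand (-1) []
    if PySem.List.pyGetD lastc 0 0 ≤ PySem.List.pyGetD lastc 1 0 then out ++ [lastc] else out

-- ===== PRECONDITION & SPEC =====
-- Pre_: exactly where Python A returns (no IndexError): A reads iv[0] and iv[1] of every
-- interval, so A raises iff some interval has fewer than 2 elements.
def Pre_get_nonintersecting_intervals (interval_list : List (List Int)) (cds_len : Int) : Prop :=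
  ∀ iv ∈ interval_list, 2 ≤ iv.length
instance (interval_list : List (List Int)) (cds_len : Int) : Decidable (Pre_get_nonintersecting_intervals interval_list cds_len) := by unfold Pre_get_nonintersecting_intervals; infer_instance
def pvWitness_get_nonintersecting_intervals : List (List Int) × Int := ([[2, 4], [7, 9]], 12)

def Spec_get_nonintersecting_intervals (interval_list : List (List Int)) (cds_len : Int) (out : List (List Int)) : Prop := out = get_nonintersecting_intervals_alt interval_list cds_len
instance (interval_list : List (List Int)) (cds_len : Int) (out : List (List Int)) : Decidable (Spec_get_nonintersecting_intervals interval_list cds_len out) := by unfold Spec_get_nonintersecting_intervals; infer_instance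

-- ===== CLAIM (what is proved, stated in full; the proofs are below) =====
def Claim_equal_get_nonintersecting_intervals : Prop := ∀ (interval_list : List (List Int)) (cds_len : Int), Dom_get_nonintersecting_intervals interval_list cds_len → Pre_get_nonintersecting_intervals interval_list cds_len → Spec_get_nonintersecting_intervals interval_list cds_len (get_nonintersecting_intervals interval_list cds_len)

-- ===== LEMMAS AND PROOFS =====

-- What one iteration of A's loop appends (as a function of the enumerated pair).
def pvF (l : List (List Int)) (c : Int) (p : Int × List Int) : List (List Int) :=
  (if p.1 = 0 ∧ PySem.List.pyGetD p.2 0 0 ≠ 0 then [[0, PySem.List.pyGetD p.2 0 0 - 1]] else [])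
  ++ (if p.1 < (l.length : Int) - 1 then
        [[PySem.List.pyGetD p.2 1 0 + 1,
          PySem.List.pyGetD (PySem.List.pyGetD l (p.1 + 1) []) 0 0 - 1]] else [])
  ++ (if p.1 = (l.length : Int) - 1 ∧ PySem.List.pyGetD p.2 1 0 < c then
        [[PySem.List.pyGetD p.2 1 0 + 1, c]] else [])

lemma A_eq_flatMap (l : List (List Int)) (c : Int) :
    get_nonintersecting_intervals l c = (PySem.List.enumerate l 0).flatMap (pvF l c) := by
  have hbody : (fun (acc : List (List Int)) (p : Int × List Int) =>
      let i := p.1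
      let interval := p.2
      let acc := if i = 0 ∧ PySem.List.pyGetD interval 0 0 ≠ 0 then
          acc ++ [[0, PySem.List.pyGetD interval 0 0 - 1]] else acc
      let acc := if i < (l.length : Int) - 1 then
          acc ++ [[PySem.List.pyGetD interval 1 0 + 1,
                   PySem.List.pyGetD (PySem.List.pyGetD l (i + 1) []) 0 0 - 1]] else acc
      if i = (l.length : Int) - 1 ∧ PySem.List.pyGetD interval 1 0 < c then
          acc ++ [[PySem.List.pyGetD interval 1 0 + 1, c]] else acc)
      = (fun acc p => acc ++ pvF l c p) := by
    funext acc p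
    simp only [pvF]
    split_ifs <;> simp
  show (PySem.List.enumerate l 0).foldl _ [] = _
  rw [hbody, PySem.List.foldl_append_eq_flatMap]
  simp

-- The core induction on A's side: the flatMap of pvF over the enumerated suffix starting at
-- position pre.length equals head-gap (only at position 0) ++ adjacent-pair gaps ++ tail-gap.
lemma aux_flatMap (c : Int) :
    ∀ (suf : List (List Int)) (a : List Int) (pre l : List (List Int)),
      l = pre ++ a :: suf →
      (PySem.List.enumerate (a :: suf) (pre.length : Int)).flatMap (pvF l c) =
        (if pre.length = 0 ∧ PySem.List.pyGetD a 0 0 ≠ 0 then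
            [[0, PySem.List.pyGetD a 0 0 - 1]] else [])
        ++ ((a :: suf).zip suf).map (fun p =>
              [PySem.List.pyGetD p.1 1 0 + 1, PySem.List.pyGetD p.2 0 0 - 1])
        ++ (if PySem.List.pyGetD ((a :: suf).getLast (List.cons_ne_nil a suf)) 1 0 < c then
              [[PySem.List.pyGetD ((a :: suf).getLast (List.cons_ne_nil a suf)) 1 0 + 1, c]]
            else []) := by
  intro suf
  induction suf with
  | nil =>
    intro a pre l hl
    subst hl
    simp only [PySem.List.enumerate_cons, PySem.List.enumerate_nil, List.flatMap_cons,
      List.flatMap_nil, List.append_nil, pvF, List.zip_nil_right, List.map_nil,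
      List.getLast_singleton]
    have hlen : ((pre ++ [a]).length : Int) = (pre.length : Int) + 1 := by
      simp
    have h1 : ¬ ((pre.length : Int) < ((pre ++ [a]).length : Int) - 1) := by
      rw [hlen]; omega
    have h2 : (pre.length : Int) = ((pre ++ [a]).length : Int) - 1 := by
      rw [hlen]; omega
    rw [if_neg h1]
    have e1 : ((pre.length : Int) = 0 ∧ PySem.List.pyGetD a 0 0 ≠ 0)
        = (pre.length = 0 ∧ PySem.List.pyGetD a 0 0 ≠ 0) := by
      apply propext
      constructor <;> (rintro ⟨h, h'⟩; exact ⟨by omega, h'⟩)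
    have e2 : ((pre.length : Int) = ((pre ++ [a]).length : Int) - 1 ∧ PySem.List.pyGetD a 1 0 < c)
        = (PySem.List.pyGetD a 1 0 < c) := by
      apply propext
      constructor
      · rintro ⟨_, h⟩; exact h
      · intro h; exact ⟨h2, h⟩
    simp only [e1, e2]
    simp
  | cons b t ih =>
    intro a pre l hl
    have hstep : PySem.List.enumerate (a :: b :: t) (pre.length : Int)
        = ((pre.length : Int), a) :: PySem.List.enumerate (b :: t) ((pre.length : Int) + 1) := by
      simp [PySem.List.enumerate_cons]
    have hcast : ((pre.length : Int) + 1) = (((pre ++ [a]).length : Nat) : Int) := by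
      simp
    have hl' : l = (pre ++ [a]) ++ b :: t := by simp [hl]
    have ihh := ih b (pre ++ [a]) l hl'
    rw [hstep, List.flatMap_cons, hcast, ihh]
    have hn : (l.length : Int) = (pre.length : Int) + 2 + (t.length : Int) := by
      subst hl; simp [List.length_append]; omega
    have hmidc : (pre.length : Int) < (l.length : Int) - 1 := by rw [hn]; omega
    have htailc : ¬ ((pre.length : Int) = (l.length : Int) - 1) := by rw [hn]; omega
    have hnext : PySem.List.pyGetD l ((pre.length : Int) + 1) [] = b := by
      have : ((pre.length : Int) + 1) = ((pre.length + 1 : Nat) : Int) := by push_cast; ring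
      rw [this, PySem.List.pyGetD_natCast]
      subst hl
      rw [List.getD_eq_getElem?_getD, List.getElem?_append_right (by omega)]
      simp
    simp only [pvF, hmidc, if_pos, htailc, false_and, if_false, List.append_nil,
      hnext]
    have hhead : ¬ ((pre ++ [a]).length = 0) := by simp
    simp only [hhead, false_and, if_false, List.nil_append]
    have hlast : (b :: t).getLast (List.cons_ne_nil b t)
        = ((a :: b :: t).getLast (List.cons_ne_nil a (b :: t))) := by
      simp [List.getLast_cons]
    rw [hlast]
    simp [List.append_assoc]

-- B's side: the zip of the two padded boundary columns, in explicit head/middle/tail form.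
lemma zip_boundary (f g : List Int → Int) (t : Int) :
    ∀ (rest : List (List Int)) (a : List Int) (x : Int),
      (x :: (a :: rest).map f).zip ((a :: rest).map g ++ [t]) =
        (x, g a) :: (((a :: rest).zip rest).map (fun p => (f p.1, g p.2)))
          ++ [(f ((a :: rest).getLast (List.cons_ne_nil a rest)), t)] := by
  intro rest
  induction rest with
  | nil => intro a x; simp
  | cons b r ih =>
    intro a x
    have h1 : (x :: (a :: b :: r).map f).zip ((a :: b :: r).map g ++ [t])
        = (x, g a) :: ((f a :: (b :: r).map f).zip ((b :: r).map g ++ [t])) := by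
      simp
    rw [h1, ih b (f a)]
    have hlast : (b :: r).getLast (List.cons_ne_nil b r)
        = (a :: b :: r).getLast (List.cons_ne_nil a (b :: r)) := by
      simp [List.getLast_cons]
    rw [hlast]
    simp [List.zip_cons_cons]

-- cand[1:-1] on the explicit head/middle/tail shape.
lemma slice_middle {α : Type} (u z : α) (ys : List α) :
    PySem.List.slice (u :: ys ++ [z]) (some 1) (some (-1)) = ys := by
  have hn : (u :: ys ++ [z]).length = ys.length + 2 := by simp
  simp only [PySem.List.slice, PySem.List.clampIdx, hn]
  norm_num
  have h1 : (if (ys.length : Int) + 2 < 1 then 0 else ((ys.length : Int) + 2 + -1).toNat) - 1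
      = ys.length := by
    rw [if_neg (by omega)]
    omega
  rw [h1, List.take_left]

-- ===== VERDICT (by name: the statement is the Claim_ definition above) =====
theorem get_nonintersecting_intervals_spec : Claim_equal_get_nonintersecting_intervals := by
  intro l c _hdom _hpre
  show get_nonintersecting_intervals l c = get_nonintersecting_intervals_alt l c
  rw [A_eq_flatMap]
  cases l with
  | nil => simp [get_nonintersecting_intervals_alt, PySem.List.enumerate_nil]
  | cons first rest =>
    have h0 : ((0 : Int)) = (([] : List (List Int)).length : Int) := by simp
    rw [h0, aux_flatMap c rest first [] (first :: rest) (by simp)]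
    -- unfold B and put cand in head/middle/tail form
    show _ = get_nonintersecting_intervals_alt (first :: rest) c
    simp only [get_nonintersecting_intervals_alt]
    rw [zip_boundary (fun iv => PySem.List.pyGetD iv 1 0) (fun iv => PySem.List.pyGetD iv 0 0)
      (c + 1) rest first (-1)]
    set lst := (first :: rest).getLast (List.cons_ne_nil first rest) with hlst
    set mids := ((first :: rest).zip rest).map
      (fun p => (PySem.List.pyGetD p.1 1 0, PySem.List.pyGetD p.2 0 0)) with hmids
    have hmap : (((-1, PySem.List.pyGetD first 0 0) :: mids
        ++ [(PySem.List.pyGetD lst 1 0, c + 1)]).map (fun p => [p.1 + 1, p.2 - 1]))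
        = [0, PySem.List.pyGetD first 0 0 - 1]
          :: mids.map (fun p => [p.1 + 1, p.2 - 1])
          ++ [[PySem.List.pyGetD lst 1 0 + 1, c]] := by
      simp only [List.map_cons, List.map_append, List.map_nil]
      norm_num
    rw [hmap]
    have hslice := slice_middle ([0, PySem.List.pyGetD first 0 0 - 1])
      ([PySem.List.pyGetD lst 1 0 + 1, c]) (mids.map (fun p => [p.1 + 1, p.2 - 1]))
    rw [hslice]
    have hcandlast : PySem.List.pyGetD ([0, PySem.List.pyGetD first 0 0 - 1]
        :: mids.map (fun p => [p.1 + 1, p.2 - 1]) ++ [[PySem.List.pyGetD lst 1 0 + 1, c]]) (-1) []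
        = [PySem.List.pyGetD lst 1 0 + 1, c] := by
      have : ([0, PySem.List.pyGetD first 0 0 - 1] :: mids.map (fun p => [p.1 + 1, p.2 - 1])
          ++ [[PySem.List.pyGetD lst 1 0 + 1, c]])
          = (([0, PySem.List.pyGetD first 0 0 - 1] :: mids.map (fun p => [p.1 + 1, p.2 - 1]))
            ++ [[PySem.List.pyGetD lst 1 0 + 1, c]]) := by simp
      rw [this, PySem.List.pyGetD_neg_one_append_singleton]
    have hrights0 : PySem.List.pyGetD ((first :: rest).map
        (fun iv => PySem.List.pyGetD iv 0 0) ++ [c + 1]) 0 0 = PySem.List.pyGetD first 0 0 := by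
      simp [PySem.List.pyGetD_zero_cons]
    -- evaluate the literal two-element candidate gap lookups
    have hl0 : PySem.List.pyGetD ([PySem.List.pyGetD lst 1 0 + 1, c] : List Int) 0 0
        = PySem.List.pyGetD lst 1 0 + 1 := PySem.List.pyGetD_zero_cons _ _ _
    have hl1 : PySem.List.pyGetD ([PySem.List.pyGetD lst 1 0 + 1, c] : List Int) 1 0 = c := by
      have h1c : ((1 : Int)) = ((1 : Nat) : Int) := rfl
      rw [h1c, PySem.List.pyGetD_natCast]
      rfl
    have hmm : mids.map (fun p => [p.1 + 1, p.2 - 1])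
        = ((first :: rest).zip rest).map
            (fun p => [PySem.List.pyGetD p.1 1 0 + 1, PySem.List.pyGetD p.2 0 0 - 1]) := by
      rw [hmids, List.map_map]; rfl
    have hle : (PySem.List.pyGetD lst 1 0 + 1 ≤ c) ↔ (PySem.List.pyGetD lst 1 0 < c) := by omega
    simp only [hcandlast]
    simp only [hl0, hl1, hle, hrights0, PySem.List.insert_zero,
      List.length_nil, true_and, hmm]
    by_cases h1 : PySem.List.pyGetD first 0 0 = 0 <;>
      by_cases h2 : PySem.List.pyGetD lst 1 0 < c <;>
        simp [h1, h2]
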